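-- pv_equiv track=rewrite | github.com/Testatost/Porta-fontium-URL-Crawler | main.py | pick_default_option
-- ===== SOURCE A (Python) =====
-- from typing import Dict, List, Tuple, Optional
--
-- def pick_default_option(opts: List[Tuple[str, str]]) -> str:
--     if not opts:
--         return ""
--     # 1) value="" bevorzugen
--     for lab, val in opts:
--         if (val or "") == "":
--             return val
--     # 2) value "All"
--     for lab, val in opts:
--         if (val or "").lower() == "all":
--             return val
--     # 3) Label enthält "Alle" / "Vše" / "All"
--     for lab, val in opts:
--         low = (lab or "").strip().lower()
--         if "alle" in low or "vše" in low or low == "all":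
--             return val
--     return opts[0][1]
-- ===== SOURCE B (Python) =====
-- def pick_default_option(opts):
--     if not opts:
--         return ""
--     first_empty = first_all = first_label = None
--     for lab, val in opts:
--         if first_empty is None and (val or "") == "":
--             first_empty = val
--         if first_all is None and (val or "").lower() == "all":
--             first_all = val
--         if first_label is None:
--             low = (lab or "").strip().lower()
--             if "alle" in low or "vše" in low or low == "all":
--                 first_label = val
--     if first_empty is not None:
--         return first_empty
--     if first_all is not None:
--         return first_all
--     if first_label is not None:
--         return first_label
--     return opts[0][1]
-- ===== Notes on version B (the rewrite author's own statement) =====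
-- stated objective: alternative
-- what changed: replaces A's three sequential full scans (one per priority tier) with a single pass maintaining three first-match accumulators merged by priority afterwards
import Mathlib
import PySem

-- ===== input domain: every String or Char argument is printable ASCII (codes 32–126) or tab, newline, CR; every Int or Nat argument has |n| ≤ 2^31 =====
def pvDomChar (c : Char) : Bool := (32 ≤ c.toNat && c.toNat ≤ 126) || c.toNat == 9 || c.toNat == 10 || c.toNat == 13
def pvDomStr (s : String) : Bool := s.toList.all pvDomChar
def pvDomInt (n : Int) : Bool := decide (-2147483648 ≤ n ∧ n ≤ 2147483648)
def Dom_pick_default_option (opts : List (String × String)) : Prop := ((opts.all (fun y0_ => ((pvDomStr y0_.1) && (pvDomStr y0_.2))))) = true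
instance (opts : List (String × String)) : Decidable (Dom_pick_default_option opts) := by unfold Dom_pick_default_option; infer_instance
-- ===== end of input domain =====

-- B replaces A's three sequential full scans (one per priority tier) with a single pass
-- over the options maintaining three first-match accumulators, merged by priority at the end.


-- ===== PORT A =====
-- Python's `s or ""` on a string: "" if s is empty, else s.
def pvOrEmpty (s : String) : String := if s == "" then "" else s

-- the three tier conditions, exactly as both Pythons write them
def condEmpty (val : String) : Bool := pvOrEmpty val == ""
def condAll (val : String) : Bool := PySem.Str.lower (pvOrEmpty val) == "all"
def condLabel (lab : String) : Bool :=
  let low := PySem.Str.lower (PySem.Str.strip (pvOrEmpty lab))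
  PySem.Str.isIn "alle" low || PySem.Str.isIn "vše" low || low == "all"

-- loop 1: `for lab, val in opts: if (val or "") == "": return val` (none = fell through)
def aLoop1 : List (String × String) → Option String
  | [] => none
  | (_, val) :: rest => if condEmpty val then some val else aLoop1 rest

-- loop 2: `if (val or "").lower() == "all": return val`
def aLoop2 : List (String × String) → Option String
  | [] => none
  | (_, val) :: rest => if condAll val then some val else aLoop2 rest

-- loop 3: label contains "alle"/"vše" or equals "all"
def aLoop3 : List (String × String) → Option String
  | [] => none
  | (lab, val) :: rest => if condLabel lab then some val else aLoop3 rest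

def pick_default_option (opts : List (String × String)) : String :=
  match opts with
  | [] => ""                                   -- if not opts: return ""
  | (l0, v0) :: rest =>
    match aLoop1 ((l0, v0) :: rest) with       -- loop 1, early return
    | some v => v
    | none =>
      match aLoop2 ((l0, v0) :: rest) with     -- loop 2
      | some v => v
      | none =>
        match aLoop3 ((l0, v0) :: rest) with   -- loop 3
        | some v => v
        | none => v0                           -- return opts[0][1]

-- ===== PORT B =====
-- one fold step: set each accumulator only the first time its tier condition matches
def bStep (st : Option String × Option String × Option String) (p : String × String) :
    Option String × Option String × Option String :=
  let e := if st.1.isNone && condEmpty p.2 then some p.2 else st.1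
  let a := if st.2.1.isNone && condAll p.2 then some p.2 else st.2.1
  let l := if st.2.2.isNone && condLabel p.1 then some p.2 else st.2.2
  (e, a, l)

def pick_default_option_alt (opts : List (String × String)) : String :=
  match opts with
  | [] => ""
  | (_, v0) :: _ =>
    match opts.foldl bStep (none, none, none) with
    | (some v, _, _) => v
    | (none, some v, _) => v
    | (none, none, some v) => v
    | (none, none, none) => v0

-- ===== PRECONDITION & SPEC =====
def Spec_pick_default_option (opts : List (String × String)) (out : String) : Prop := out = pick_default_option_alt opts
instance (opts : List (String × String)) (out : String) : Decidable (Spec_pick_default_option opts out) := by unfold Spec_pick_default_option; infer_instance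

-- ===== CLAIM (what is proved, stated in full; the proofs are below) =====
def Claim_equal_pick_default_option : Prop := ∀ (opts : List (String × String)), Dom_pick_default_option opts → Spec_pick_default_option opts (pick_default_option opts)

-- ===== LEMMAS AND PROOFS =====
-- priority merge of two Options (first one wins)
def orO (x y : Option String) : Option String := match x with | some v => some v | none => y

-- the fold computes, in each slot, the already-found value or the first match in the rest
theorem fold_eq (opts : List (String × String)) : ∀ (e a l : Option String),
    opts.foldl bStep (e, a, l) = (orO e (aLoop1 opts), orO a (aLoop2 opts), orO l (aLoop3 opts)) := by
  induction opts with
  | nil => intro e a l; cases e <;> cases a <;> cases l <;> simp [aLoop1, aLoop2, aLoop3, orO]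
  | cons p rest ih =>
    intro e a l
    obtain ⟨lab, val⟩ := p
    simp only [List.foldl_cons, bStep, ih]
    cases e <;> cases a <;> cases l <;>
      simp [aLoop1, aLoop2, aLoop3, orO] <;> split_ifs <;> simp

-- ===== VERDICT (by name: the statement is the Claim_ definition above) =====
theorem pick_default_option_spec : Claim_equal_pick_default_option := by
  intro opts _
  unfold Spec_pick_default_option pick_default_option pick_default_option_alt
  cases opts with
  | nil => rfl
  | cons p rest =>
    obtain ⟨l0, v0⟩ := p
    rw [fold_eq]
    simp only [orO]
    cases aLoop1 ((l0, v0) :: rest) <;> cases aLoop2 ((l0, v0) :: rest) <;>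
      cases aLoop3 ((l0, v0) :: rest) <;> rfl
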